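-- pv_equiv track=rewrite | github.com/Multitech75/eTims-MSKL | mtl_tims/etims_integration/background_tasks/tasks.py | find_best_company_match
-- ===== SOURCE A (Python) =====
-- def find_best_company_match(cluster_name, companies):
--     """Simple company matching using string comparison"""
--     if not cluster_name or not companies:
--         return ""
--
--     cluster_lower = cluster_name.lower()
--
--     for company in companies:
--         if company.lower() == cluster_lower:
--             return company
--
--     for company in companies:
--         company_lower = company.lower()
--         if cluster_lower in company_lower or company_lower in cluster_lower:
--             return company
--
--     cluster_words = get_significant_words(cluster_lower)
--     if cluster_words:
--         for company in companies:
--             company_words = get_significant_words(company.lower())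
--             if any(word in company_words for word in cluster_words):
--                 return company
--
--     return ""
--
-- def get_significant_words(text):
--     """Extract meaningful words for matching"""
--     common_words = {'the', 'and', 'of', 'for', 'in', 'with', 'company', 'co', 'ltd', 'pty'}
--     return [
--         word for word in text.split()
--         if len(word) > 3 and word not in common_words
--     ]
-- ===== SOURCE B (Python) =====
-- def get_significant_words(text):
--     """Extract meaningful words for matching"""
--     common_words = {'the', 'and', 'of', 'for', 'in', 'with', 'company', 'co', 'ltd', 'pty'}
--     return [
--         word for word in text.split()
--         if len(word) > 3 and word not in common_words
--     ]
--
-- def find_best_company_match(cluster_name, companies):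
--     """Single priority pass: rate each company once, keep the first best-tier hit."""
--     if not cluster_name or not companies:
--         return ""
--     cluster_lower = cluster_name.lower()
--     cluster_words = get_significant_words(cluster_lower)
--     best_tier = 4
--     best_company = ""
--     for company in companies:
--         company_lower = company.lower()
--         if company_lower == cluster_lower:
--             tier = 1
--         elif cluster_lower in company_lower or company_lower in cluster_lower:
--             tier = 2
--         elif any(word in get_significant_words(company_lower) for word in cluster_words):
--             tier = 3
--         else:
--             tier = 4
--         if tier < best_tier:
--             best_tier = tier
--             best_company = company
--     return best_company
-- ===== Notes on version B (the rewrite author's own statement) =====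
-- stated objective: alternative
-- what changed: A's three separate scans (exact match, substring match, word overlap) are collapsed into one pass that rates every company with a priority tier and keeps the first company at the strictly smallest tier; the redundant 'if cluster_words' guard disappears because the overlap test is vacuously false when the word list is empty.
import Mathlib
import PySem

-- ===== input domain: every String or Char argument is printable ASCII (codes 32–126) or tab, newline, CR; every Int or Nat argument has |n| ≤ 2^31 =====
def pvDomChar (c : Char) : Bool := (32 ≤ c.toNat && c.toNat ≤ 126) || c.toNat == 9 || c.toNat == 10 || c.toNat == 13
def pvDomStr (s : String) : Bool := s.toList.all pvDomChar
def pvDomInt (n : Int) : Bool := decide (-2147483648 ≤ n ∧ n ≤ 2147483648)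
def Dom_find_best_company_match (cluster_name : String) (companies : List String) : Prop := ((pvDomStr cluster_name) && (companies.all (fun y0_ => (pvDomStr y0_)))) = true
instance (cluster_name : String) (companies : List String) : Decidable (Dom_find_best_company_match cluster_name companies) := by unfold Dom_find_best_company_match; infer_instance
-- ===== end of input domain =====

-- B rates every company once with a priority tier in a single pass instead of A's three scans; alternative decomposition, same results.


-- shared same-module helper get_significant_words (used by both Pythons verbatim)
def pvCommonWords : List String := PySem.Set.ofList ["the", "and", "of", "for", "in", "with", "company", "co", "ltd", "pty"]

def getSignificantWords (text : String) : List String :=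
  (PySem.Str.split₀ text).filter (fun word => decide (3 < PySem.Str.len word) && !(pvCommonWords.contains word))

-- ===== PORT A =====
def find_best_company_match (cluster_name : String) (companies : List String) : String :=
  if cluster_name == "" || companies.isEmpty then ""
  else
    let cluster_lower := PySem.Str.lower cluster_name
    match companies.find? (fun company => PySem.Str.lower company == cluster_lower) with
    | some company => company
    | none =>
      match companies.find? (fun company =>
          PySem.Str.isIn cluster_lower (PySem.Str.lower company) ||
          PySem.Str.isIn (PySem.Str.lower company) cluster_lower) with
      | some company => company
      | none =>
        let cluster_words := getSignificantWords cluster_lower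
        if !cluster_words.isEmpty then
          match companies.find? (fun company =>
              cluster_words.any (fun word => (getSignificantWords (PySem.Str.lower company)).contains word)) with
          | some company => company
          | none => ""
        else ""

-- ===== PORT B =====
def tierOf (cluster_lower : String) (cluster_words : List String) (company : String) : Nat :=
  if PySem.Str.lower company == cluster_lower then 1
  else if PySem.Str.isIn cluster_lower (PySem.Str.lower company) || PySem.Str.isIn (PySem.Str.lower company) cluster_lower then 2
  else if cluster_words.any (fun word => (getSignificantWords (PySem.Str.lower company)).contains word) then 3
  else 4

def find_best_company_match_alt (cluster_name : String) (companies : List String) : String :=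
  if cluster_name == "" || companies.isEmpty then ""
  else
    let cluster_lower := PySem.Str.lower cluster_name
    let cluster_words := getSignificantWords cluster_lower
    (companies.foldl (fun (st : Nat × String) company =>
        let tier := tierOf cluster_lower cluster_words company
        if tier < st.1 then (tier, company) else st) (4, "")).2

-- ===== PRECONDITION & SPEC =====
def Spec_find_best_company_match (cluster_name : String) (companies : List String) (out : String) : Prop := out = find_best_company_match_alt cluster_name companies
instance (cluster_name : String) (companies : List String) (out : String) : Decidable (Spec_find_best_company_match cluster_name companies out) := by unfold Spec_find_best_company_match; infer_instance

-- ===== CLAIM (what is proved, stated in full; the proofs are below) =====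
def Claim_equal_find_best_company_match : Prop := ∀ (cluster_name : String) (companies : List String), Dom_find_best_company_match cluster_name companies → Spec_find_best_company_match cluster_name companies (find_best_company_match cluster_name companies)

-- ===== LEMMAS AND PROOFS =====

-- the three matching conditions, in A's order
def pvC1 (cl c : String) : Bool := PySem.Str.lower c == cl
def pvC2 (cl c : String) : Bool :=
  PySem.Str.isIn cl (PySem.Str.lower c) || PySem.Str.isIn (PySem.Str.lower c) cl
def pvC3 (cw : List String) (c : String) : Bool :=
  cw.any (fun word => (getSignificantWords (PySem.Str.lower c)).contains word)

lemma pvC1_imp_pvC2 (cl c : String) (h : pvC1 cl c = true) : pvC2 cl c = true := by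
  unfold pvC1 at h
  unfold pvC2
  have he : PySem.Str.lower c = cl := by simpa using h
  rw [he]
  have : PySem.Chars.isIn cl.toList cl.toList = true := (PySem.Chars.isIn_iff_infix _ _).mpr List.infix_rfl
  simp [this]

lemma one_le_tierOf (cl : String) (cw : List String) (c : String) : 1 ≤ tierOf cl cw c := by
  unfold tierOf; split_ifs <;> omega

lemma tier_eq_one (cl : String) (cw : List String) (c : String) :
    (tierOf cl cw c == 1) = pvC1 cl c := by
  unfold tierOf pvC1
  split_ifs with h1 h2 h3 <;> simp_all

lemma tier_le_two (cl : String) (cw : List String) (c : String) :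
    (decide (tierOf cl cw c ≤ 2)) = pvC2 cl c := by
  unfold tierOf
  split_ifs with h1 h2 h3
  · rw [pvC1_imp_pvC2 cl c h1]; decide
  · rw [show pvC2 cl c = true from h2]; decide
  · rw [show pvC2 cl c = false from Bool.eq_false_iff.mpr h2]; decide
  · rw [show pvC2 cl c = false from Bool.eq_false_iff.mpr h2]; decide

lemma tier_le_three (cl : String) (cw : List String) (c : String) :
    (decide (tierOf cl cw c ≤ 3)) = (pvC2 cl c || pvC3 cw c) := by
  unfold tierOf
  split_ifs with h1 h2 h3
  · rw [show pvC2 cl c = true from pvC1_imp_pvC2 cl c h1]; simp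
  · rw [show pvC2 cl c = true from h2]; simp
  · rw [show pvC2 cl c = false from Bool.eq_false_iff.mpr h2,
        show pvC3 cw c = true from h3]; decide
  · rw [show pvC2 cl c = false from Bool.eq_false_iff.mpr h2,
        show pvC3 cw c = false from Bool.eq_false_iff.mpr h3]; decide

-- the single-pass fold of B, characterised level by level
def pvStep (cl : String) (cw : List String) (st : Nat × String) (company : String) : Nat × String :=
  let tier := tierOf cl cw company
  if tier < st.1 then (tier, company) else st

lemma fold_one (cl : String) (cw : List String) (l : List String) (b : String) :
    l.foldl (pvStep cl cw) (1, b) = (1, b) := by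
  induction l with
  | nil => rfl
  | cons x xs ih =>
    have := one_le_tierOf cl cw x
    simp only [List.foldl_cons, pvStep]
    rw [if_neg (by omega)]
    exact ih

lemma fold_two (cl : String) (cw : List String) (l : List String) (b : String) :
    l.foldl (pvStep cl cw) (2, b) =
      match l.find? (fun c => tierOf cl cw c == 1) with
      | some c => (1, c)
      | none => (2, b) := by
  induction l generalizing b with
  | nil => rfl
  | cons x xs ih =>
    have h1 := one_le_tierOf cl cw x
    simp only [List.foldl_cons, pvStep, List.find?_cons]
    by_cases hx : tierOf cl cw x = 1
    · rw [if_pos (by omega), hx, fold_one]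
      simp
    · rw [if_neg (by omega)]
      have : (tierOf cl cw x == 1) = false := by simp [hx]
      rw [this]
      exact ih b

lemma fold_three (cl : String) (cw : List String) (l : List String) (b : String) :
    l.foldl (pvStep cl cw) (3, b) =
      match l.find? (fun c => tierOf cl cw c == 1) with
      | some c => (1, c)
      | none =>
        match l.find? (fun c => decide (tierOf cl cw c ≤ 2)) with
        | some c => (2, c)
        | none => (3, b) := by
  induction l generalizing b with
  | nil => rfl
  | cons x xs ih =>
    have h1 := one_le_tierOf cl cw x
    simp only [List.foldl_cons, pvStep, List.find?_cons]
    by_cases hx1 : tierOf cl cw x = 1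
    · rw [if_pos (by omega), hx1, fold_one]
      simp
    · have e1 : (tierOf cl cw x == 1) = false := by simp [hx1]
      rw [e1]
      by_cases hx2 : tierOf cl cw x = 2
      · rw [if_pos (by omega), hx2, fold_two]
        cases hf : xs.find? (fun c => tierOf cl cw c == 1) <;> simp
      · have e2 : (decide (tierOf cl cw x ≤ 2)) = false := by
          simp only [decide_eq_false_iff_not]; omega
        rw [if_neg (by omega), e2]
        exact ih b

lemma fold_four (cl : String) (cw : List String) (l : List String) (b : String) :
    l.foldl (pvStep cl cw) (4, b) =
      match l.find? (fun c => tierOf cl cw c == 1) with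
      | some c => (1, c)
      | none =>
        match l.find? (fun c => decide (tierOf cl cw c ≤ 2)) with
        | some c => (2, c)
        | none =>
          match l.find? (fun c => decide (tierOf cl cw c ≤ 3)) with
          | some c => (3, c)
          | none => (4, b) := by
  induction l generalizing b with
  | nil => rfl
  | cons x xs ih =>
    have h1 := one_le_tierOf cl cw x
    simp only [List.foldl_cons, pvStep, List.find?_cons]
    by_cases hx1 : tierOf cl cw x = 1
    · rw [if_pos (by omega), hx1, fold_one]
      simp
    · have e1 : (tierOf cl cw x == 1) = false := by simp [hx1]
      rw [e1]
      by_cases hx2 : tierOf cl cw x = 2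
      · rw [if_pos (by omega), hx2, fold_two]
        cases hf : xs.find? (fun c => tierOf cl cw c == 1) <;> simp
      · have e2 : (decide (tierOf cl cw x ≤ 2)) = false := by
          simp only [decide_eq_false_iff_not]; omega
        rw [e2]
        by_cases hx3 : tierOf cl cw x = 3
        · rw [if_pos (by omega), hx3, fold_three]
          cases hf : xs.find? (fun c => tierOf cl cw c == 1) with
          | some c => simp
          | none =>
            cases hg : xs.find? (fun c => decide (tierOf cl cw c ≤ 2)) <;> simp
        · have e3 : (decide (tierOf cl cw x ≤ 3)) = false := by
            simp only [decide_eq_false_iff_not]; omega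
          rw [if_neg (by omega), e3]
          exact ih b

lemma find?_congr_mem {α : Type} (l : List α) (p q : α → Bool)
    (h : ∀ x ∈ l, p x = q x) : l.find? p = l.find? q := by
  induction l with
  | nil => rfl
  | cons x xs ih =>
    simp only [List.find?_cons, h x (List.mem_cons_self)]
    split <;> [rfl; exact ih (fun y hy => h y (List.mem_cons_of_mem x hy))]

-- ===== VERDICT (by name: the statement is the Claim_ definition above) =====
set_option maxHeartbeats 1000000 in
theorem find_best_company_match_spec : Claim_equal_find_best_company_match := by
  intro cluster_name companies _
  unfold Spec_find_best_company_match find_best_company_match find_best_company_match_alt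
  by_cases hg : cluster_name == "" || companies.isEmpty
  · simp only [hg, if_true]
  · simp only [hg]
    set cl := PySem.Str.lower cluster_name with hcl
    set cw := getSignificantWords cl with hcw
    have hstep : (fun (st : Nat × String) company =>
        let tier := tierOf cl cw company
        if tier < st.1 then (tier, company) else st) = pvStep cl cw := rfl
    rw [hstep, fold_four]
    rw [show companies.find? (fun c => tierOf cl cw c == 1) = companies.find? (pvC1 cl) from
      find?_congr_mem _ _ _ (fun x _ => tier_eq_one cl cw x)]
    rw [show companies.find? (fun c => decide (tierOf cl cw c ≤ 2)) = companies.find? (pvC2 cl) from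
      find?_congr_mem _ _ _ (fun x _ => tier_le_two cl cw x)]
    rw [show (fun company => PySem.Str.lower company == cl) = pvC1 cl from rfl]
    rw [show (fun company => PySem.Str.isIn cl (PySem.Str.lower company) || PySem.Str.isIn (PySem.Str.lower company) cl) = pvC2 cl from rfl]
    rw [show (fun company => cw.any fun word => (getSignificantWords (PySem.Str.lower company)).contains word) = pvC3 cw from rfl]
    cases h1 : companies.find? (pvC1 cl) with
    | some c => simp
    | none =>
      cases h2 : companies.find? (pvC2 cl) with
      | some c => simp
      | none =>
        have hc2 : ∀ x ∈ companies, pvC2 cl x = false := by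
          intro x hx
          simpa using List.find?_eq_none.mp h2 x hx
        rw [show companies.find? (fun c => decide (tierOf cl cw c ≤ 3)) = companies.find? (pvC3 cw) from
          find?_congr_mem _ _ _ (fun x hx => by rw [tier_le_three, hc2 x hx, Bool.false_or])]
        by_cases hcwe : cw.isEmpty
        · have h3 : companies.find? (pvC3 cw) = none := by
            apply List.find?_eq_none.mpr
            intro x _
            simp [pvC3, List.isEmpty_iff.mp hcwe]
          simp [h3, hcwe]
        · cases h3 : companies.find? (pvC3 cw) with
          | some c => simp [hcwe]
          | none => simp [hcwe]
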